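-- pv_equiv track=rewrite | github.com/7BEII/Comfyui_PDuse | py/image_list_sort.py | parse_filenames
-- ===== SOURCE A (Python) =====
-- def parse_filenames(filenames_str):
--     """
--     Parse filename string into list.
--     """
--     if not filenames_str or not filenames_str.strip():
--         return []
--
--     # Split by lines or commas
--     filenames = []
--     for line in filenames_str.strip().split('\n'):
--         line = line.strip()
--         if line:
--             # Split by comma if multiple filenames in one line
--             filenames.extend([f.strip() for f in line.split(',') if f.strip()])
--
--     return filenames
-- ===== SOURCE B (Python) =====
-- def parse_filenames(filenames_str):
--     """
--     Parse filename string into list.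
--     """
--     # Single pass over the characters: cut a token at every comma or newline,
--     # strip it, and keep it if non-empty.
--     filenames = []
--     current = []
--     for ch in filenames_str + ',':
--         if ch == ',' or ch == '\n':
--             token = ''.join(current).strip()
--             if token:
--                 filenames.append(token)
--             current = []
--         else:
--             current.append(ch)
--     return filenames
-- ===== Notes on version B (the rewrite author's own statement) =====
-- stated objective: alternative
-- what changed: Replaced the nested strip/split-by-lines/split-by-commas traversal with a single left-to-right character scan that cuts a token at each separator character, strips it and keeps it if non-empty.
import Mathlib
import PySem

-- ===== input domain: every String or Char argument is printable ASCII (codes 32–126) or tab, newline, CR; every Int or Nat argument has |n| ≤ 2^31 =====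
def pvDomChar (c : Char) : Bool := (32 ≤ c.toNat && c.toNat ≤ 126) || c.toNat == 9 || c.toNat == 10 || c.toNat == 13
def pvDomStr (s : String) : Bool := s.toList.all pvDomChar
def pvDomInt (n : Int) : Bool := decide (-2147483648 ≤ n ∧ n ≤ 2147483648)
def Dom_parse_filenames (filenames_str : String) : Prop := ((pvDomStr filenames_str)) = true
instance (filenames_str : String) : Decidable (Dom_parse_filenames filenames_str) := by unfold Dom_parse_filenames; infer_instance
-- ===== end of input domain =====

-- B replaces A's nested line-then-comma splitting passes by a single character scan; alternative decomposition, same output.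

-- ===== PORT A =====
def parse_filenames (filenames_str : String) : List String :=
  if filenames_str.toList = [] ∨ PySem.Chars.strip filenames_str.toList = [] then []
  else
    (PySem.Chars.splitOn (PySem.Chars.strip filenames_str.toList) ['\n']).foldl
      (fun acc line =>
        let line' := PySem.Chars.strip line
        if line' ≠ [] then
          acc ++ (((PySem.Chars.splitOn line' [',']).map PySem.Chars.strip).filter (· ≠ [])).map
            (fun t => String.ofList t)
        else acc) []

-- ===== PORT B =====
def pvBStep (st : List String × List Char) (ch : Char) : List String × List Char :=
  if ch = ',' ∨ ch = '\n' then
    let token := PySem.Chars.strip st.2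
    (if token ≠ [] then st.1 ++ [String.ofList token] else st.1, [])
  else (st.1, st.2 ++ [ch])

def parse_filenames_alt (filenames_str : String) : List String :=
  ((filenames_str.toList ++ [',']).foldl pvBStep ([], [])).1

-- ===== PRECONDITION & SPEC =====
def Spec_parse_filenames (filenames_str : String) (out : List String) : Prop := out = parse_filenames_alt filenames_str
instance (filenames_str : String) (out : List String) : Decidable (Spec_parse_filenames filenames_str out) := by unfold Spec_parse_filenames; infer_instance

-- ===== CLAIM (what is proved, stated in full; the proofs are below) =====
def Claim_equal_parse_filenames : Prop := ∀ (filenames_str : String), Dom_parse_filenames filenames_str → Spec_parse_filenames filenames_str (parse_filenames filenames_str)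

-- ===== LEMMAS AND PROOFS =====

-- tokens of cs split at every character satisfying d (keeps empty tokens)
def pvToks (d : Char → Bool) : List Char → List (List Char)
  | [] => [[]]
  | c :: cs => if d c then [] :: pvToks d cs else (pvToks d cs).modifyHead (c :: ·)

def pvDB : Char → Bool := fun c => c == ',' || c == '\n'

-- the common normal form both ports are reduced to: strip every token, drop the empty ones
def pvFres (d : Char → Bool) (cs : List Char) : List (List Char) :=
  ((pvToks d cs).map PySem.Chars.strip).filter (· ≠ [])

theorem pvToks_ne_nil (d : Char → Bool) (cs : List Char) : pvToks d cs ≠ [] := by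
  induction cs with
  | nil => simp [pvToks]
  | cons c cs ih =>
    simp only [pvToks]
    split
    · simp
    · cases h : pvToks d cs with
      | nil => exact absurd h ih
      | cons t ts => simp [h]

theorem pvToks_cons_ex (d : Char → Bool) (cs : List Char) :
    ∃ t ts, pvToks d cs = t :: ts := by
  cases h : pvToks d cs with
  | nil => exact absurd h (pvToks_ne_nil d cs)
  | cons t ts => exact ⟨t, ts, rfl⟩

theorem pvGo_spec (c0 : Char) : ∀ (fuel : Nat) (l cur : List Char) (acc : List (List Char)),
    l.length < fuel →
    PySem.Chars.splitOn.go [c0] fuel l cur acc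
      = acc.reverse ++ (pvToks (· == c0) l).modifyHead (cur.reverse ++ ·) := by
  intro fuel
  induction fuel with
  | zero => intro l cur acc h; omega
  | succ fuel ih =>
    intro l cur acc h
    cases l with
    | nil => simp [PySem.Chars.splitOn.go, pvToks]
    | cons c rest =>
      simp only [PySem.Chars.splitOn.go]
      by_cases hc : c0 = c
      · subst hc
        have hpre : [c0].isPrefixOf (c0 :: rest) = true := by simp [List.isPrefixOf]
        rw [if_pos hpre]
        have hdrop : List.drop [c0].length (c0 :: rest) = rest := by simp
        rw [hdrop]
        rw [ih rest [] (cur.reverse :: acc) (by simpa using Nat.lt_of_succ_lt_succ h)]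
        obtain ⟨t, ts, ht⟩ := pvToks_cons_ex (· == c0) rest
        simp [pvToks, ht]
      · have hpre : [c0].isPrefixOf (c :: rest) = false := by
          simp [List.isPrefixOf]; exact fun h' => hc h'
        rw [if_neg (by simp [hpre])]
        rw [ih rest (c :: cur) acc (by simpa using Nat.lt_of_succ_lt_succ h)]
        obtain ⟨t, ts, ht⟩ := pvToks_cons_ex (· == c0) rest
        have : (c == c0) = false := by simp; exact fun h' => hc h'.symm
        simp [pvToks, ht, this]


theorem pvSplitOn_eq_toks (c0 : Char) (cs : List Char) :
    PySem.Chars.splitOn cs [c0] = pvToks (· == c0) cs := by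
  rw [PySem.Chars.splitOn, pvGo_spec c0 (cs.length + 1) cs [] [] (by omega)]
  obtain ⟨t, ts, ht⟩ := pvToks_cons_ex (· == c0) cs
  simp [ht]


theorem pvToks_flatMap (cs : List Char) :
    pvToks pvDB cs = (pvToks (· == '\n') cs).flatMap (pvToks (· == ',')) := by
  induction cs with
  | nil => simp [pvToks]
  | cons c cs ih =>
    by_cases hn : c = '\n'
    · subst hn
      obtain ⟨t, ts, ht⟩ := pvToks_cons_ex (· == '\n') cs
      simp [pvToks, pvDB, ht, ih]
    · by_cases hcm : c = ','
      · subst hcm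
        obtain ⟨t, ts, ht⟩ := pvToks_cons_ex (· == '\n') cs
        obtain ⟨u, us, hu⟩ := pvToks_cons_ex (· == ',') t
        simp only [pvToks, pvDB, ht, ih] at *
        simp [pvToks, ht, hu, List.flatMap_cons, ih]
      · obtain ⟨t, ts, ht⟩ := pvToks_cons_ex (· == '\n') cs
        obtain ⟨u, us, hu⟩ := pvToks_cons_ex (· == ',') t
        have h1 : (c == '\n') = false := by simpa using hn
        have h2 : (c == ',') = false := by simpa using hcm
        have h3 : pvDB c = false := by simp [pvDB, h1, h2]
        simp [pvToks, ht, hu, h1, h2, h3, List.flatMap_cons, ih]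


theorem pvStrip_cons_ws {c : Char} (h : PySem.Chars.isspace c = true) (t : List Char) :
    PySem.Chars.strip (c :: t) = PySem.Chars.strip t := by
  simp [PySem.Chars.strip, PySem.Chars.lstrip, h]

theorem pvRstrip_append_ws {c : Char} (h : PySem.Chars.isspace c = true) (t : List Char) :
    PySem.Chars.rstrip (t ++ [c]) = PySem.Chars.rstrip t := by
  simp [PySem.Chars.rstrip, h]

theorem pvStrip_append_ws {c : Char} (h : PySem.Chars.isspace c = true) (t : List Char) :
    PySem.Chars.strip (t ++ [c]) = PySem.Chars.strip t := by
  by_cases hl : PySem.Chars.lstrip t = []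
  · have hall : ∀ x ∈ t, PySem.Chars.isspace x = true := by
      simpa [PySem.Chars.lstrip, List.dropWhile_eq_nil_iff] using hl
    have hall' : ∀ x ∈ t ++ [c], PySem.Chars.isspace x = true := by
      intro x hx; rcases List.mem_append.1 hx with hx | hx
      · exact hall x hx
      · simp at hx; subst hx; exact h
    have h2 : PySem.Chars.lstrip (t ++ [c]) = [] := by
      simpa [PySem.Chars.lstrip, List.dropWhile_eq_nil_iff] using hall'
    simp [PySem.Chars.strip, hl, h2, PySem.Chars.rstrip]
  · have : PySem.Chars.lstrip (t ++ [c]) = PySem.Chars.lstrip t ++ [c] := by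
      simp only [PySem.Chars.lstrip] at *
      rw [List.dropWhile_append]
      simp [hl]
    simp only [PySem.Chars.strip, this]
    exact pvRstrip_append_ws h _

theorem pvStrip_nil_of_all_ws {cs : List Char} (h : ∀ c ∈ cs, PySem.Chars.isspace c = true) :
    PySem.Chars.strip cs = [] := by
  have hl : PySem.Chars.lstrip cs = [] := by
    simpa [PySem.Chars.lstrip, List.dropWhile_eq_nil_iff] using h
  simp [PySem.Chars.strip, hl, PySem.Chars.rstrip]

theorem pvAll_ws_of_strip_nil {cs : List Char} (h : PySem.Chars.strip cs = []) :
    ∀ c ∈ cs, PySem.Chars.isspace c = true := by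
  simp only [PySem.Chars.strip, PySem.Chars.rstrip, PySem.Chars.lstrip] at h
  rw [List.reverse_eq_nil_iff, List.dropWhile_eq_nil_iff] at h
  intro c hc
  by_cases hw : PySem.Chars.isspace c = true
  · exact hw
  · exfalso
    have hmem : c ∈ List.dropWhile PySem.Chars.isspace cs := by
      have := List.takeWhile_append_dropWhile (p := PySem.Chars.isspace) (l := cs)
      rcases List.mem_append.1 (by rw [this]; exact hc) with h1 | h1
      · exact absurd (List.mem_takeWhile_imp h1) hw
      · exact h1
    exact hw (h c (by simpa using hmem))

theorem pvToks_subset {d : Char → Bool} {cs t : List Char} (ht : t ∈ pvToks d cs) :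
    ∀ c ∈ t, c ∈ cs := by
  induction cs generalizing t with
  | nil => simp [pvToks] at ht; subst ht; simp
  | cons c cs ih =>
    intro x hx
    by_cases hd : d c
    · simp [pvToks, hd] at ht
      rcases ht with ht | ht
      · subst ht; simp at hx
      · exact List.mem_cons_of_mem _ (ih ht x hx)
    · obtain ⟨u, us, hu⟩ := pvToks_cons_ex d cs
      simp [pvToks, hd, hu] at ht
      rcases ht with ht | ht
      · subst ht
        rcases List.mem_cons.1 hx with hx | hx
        · simp [hx]
        · exact List.mem_cons_of_mem _ (ih (hu ▸ List.mem_cons_self) x hx)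
      · exact List.mem_cons_of_mem _ (ih (hu ▸ List.mem_cons_of_mem _ ht) x hx)


theorem pvFres_nil_of_all_ws {d : Char → Bool} {cs : List Char}
    (h : ∀ c ∈ cs, PySem.Chars.isspace c = true) : pvFres d cs = [] := by
  unfold pvFres
  rw [List.filter_eq_nil_iff]
  intro a ha
  simp only [List.mem_map] at ha
  obtain ⟨t, ht, rfl⟩ := ha
  have : PySem.Chars.strip t = [] :=
    pvStrip_nil_of_all_ws (fun c hc => h c (pvToks_subset ht c hc))
  simp [this]


theorem pvFres_lstrip (d : Char → Bool) (cs : List Char) :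
    pvFres d (PySem.Chars.lstrip cs) = pvFres d cs := by
  induction cs with
  | nil => rfl
  | cons c cs ih =>
    by_cases hw : PySem.Chars.isspace c = true
    · have hl : PySem.Chars.lstrip (c :: cs) = PySem.Chars.lstrip cs := by
        simp [PySem.Chars.lstrip, hw]
      rw [hl, ih]
      -- pvFres d (c :: cs) = pvFres d cs for whitespace c
      by_cases hd : d c
      · simp [pvFres, pvToks, hd, pvStrip_nil_of_all_ws (cs := [])]
      · obtain ⟨t, ts, ht⟩ := pvToks_cons_ex d cs
        simp [pvFres, pvToks, hd, ht, pvStrip_cons_ws hw]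
    · have hl : PySem.Chars.lstrip (c :: cs) = c :: cs := by
        simp [PySem.Chars.lstrip, hw]
      rw [hl]


theorem pvToks_snoc (d : Char → Bool) (cs : List Char) (c : Char) :
    pvToks d (cs ++ [c]) = if d c then pvToks d cs ++ [[]]
      else (pvToks d cs).dropLast ++ [(pvToks d cs).getLastD [] ++ [c]] := by
  induction cs with
  | nil => by_cases hd : d c <;> simp [pvToks, hd]
  | cons b cs ih =>
    obtain ⟨t, ts, ht⟩ := pvToks_cons_ex d cs
    by_cases hd : d c
    · by_cases hb : d b
      · simp [pvToks, hb, ih, hd, ht]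
      · cases ts with
        | nil => simp [pvToks, hb, ih, hd, ht]
        | cons u us => simp [pvToks, hb, ih, hd, ht]
    · by_cases hb : d b
      · cases ts with
        | nil => simp [pvToks, hb, ih, hd, ht]
        | cons u us => simp [pvToks, hb, ih, hd, ht]
      · cases ts with
        | nil => simp [pvToks, hb, ih, hd, ht]
        | cons u us => simp [pvToks, hb, ih, hd, ht]


theorem pvDropLast_getLastD (t : List Char) (ts : List (List Char)) :
    (t :: ts).dropLast ++ [(t :: ts).getLastD []] = t :: ts := by
  have := List.dropLast_append_getLast (l := t :: ts) (by simp)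
  rw [List.getLast_eq_getLastD] at this
  rw [show (t :: ts).getLastD [] = ts.getLastD t from List.getLastD_cons]
  exact this


theorem pvFres_snoc_ws {c : Char} (hw : PySem.Chars.isspace c = true)
    (d : Char → Bool) (cs : List Char) : pvFres d (cs ++ [c]) = pvFres d cs := by
  rw [pvFres, pvToks_snoc]
  by_cases hd : d c
  · simp [hd, pvFres, List.filter_append, pvStrip_nil_of_all_ws (cs := ([] : List Char)) (by simp)]
  · rw [if_neg hd]
    obtain ⟨t, ts, ht⟩ := pvToks_cons_ex d cs
    conv_rhs => rw [pvFres, ht, ← pvDropLast_getLastD t ts]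
    rw [ht]
    simp only [List.map_append, List.filter_append, List.map_cons, List.map_nil,
      pvStrip_append_ws hw]


theorem pvFres_rstrip (d : Char → Bool) (cs : List Char) :
    pvFres d (PySem.Chars.rstrip cs) = pvFres d cs := by
  induction cs using List.reverseRecOn with
  | nil => rfl
  | append_singleton cs c ih =>
    by_cases hw : PySem.Chars.isspace c = true
    · rw [pvRstrip_append_ws hw, ih, pvFres_snoc_ws hw]
    · have : PySem.Chars.rstrip (cs ++ [c]) = cs ++ [c] := by
        simp [PySem.Chars.rstrip, hw]
      rw [this]


theorem pvFres_strip (d : Char → Bool) (cs : List Char) :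
    pvFres d (PySem.Chars.strip cs) = pvFres d cs := by
  rw [PySem.Chars.strip, pvFres_rstrip, pvFres_lstrip]

theorem pvFlatMap_filter_map {α : Type} (f : α → List (List Char)) (xs : List α) :
    xs.flatMap (fun l => ((f l).map PySem.Chars.strip).filter (· ≠ []))
      = ((xs.flatMap f).map PySem.Chars.strip).filter (· ≠ []) := by
  induction xs with
  | nil => simp
  | cons x xs ih => simp only [List.flatMap_cons, List.map_append, List.filter_append, ih]

theorem pvA_eq_normal (s : String) :
    parse_filenames s = (pvFres pvDB s.toList).map (fun t => String.ofList t) := by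
  unfold parse_filenames
  split
  · rename_i h
    rcases h with h | h
    · simp [h, pvFres, pvToks, PySem.Chars.strip, PySem.Chars.lstrip, PySem.Chars.rstrip]
    · rw [pvFres_nil_of_all_ws (pvAll_ws_of_strip_nil h)]; rfl
  · have hshape : (fun (acc : List String) (line : List Char) =>
        let line' := PySem.Chars.strip line
        if line' ≠ [] then
          acc ++ (((PySem.Chars.splitOn line' [',']).map PySem.Chars.strip).filter (· ≠ [])).map
            (fun t => String.ofList t)
        else acc)
        = fun acc line => acc ++ (if PySem.Chars.strip line ≠ [] then
            (((PySem.Chars.splitOn (PySem.Chars.strip line) [',']).map PySem.Chars.strip).filter (· ≠ [])).map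
              (fun t => String.ofList t) else []) := by
      funext acc line
      by_cases h : PySem.Chars.strip line = [] <;> simp [h]
    rw [hshape, PySem.List.foldl_append_eq_flatMap]
    have hG : ∀ line : List Char,
        (if PySem.Chars.strip line ≠ [] then
          (((PySem.Chars.splitOn (PySem.Chars.strip line) [',']).map PySem.Chars.strip).filter (· ≠ [])).map
            (fun t => String.ofList t) else [])
          = (pvFres (· == ',') line).map (fun t => String.ofList t) := by
      intro line
      by_cases hl : PySem.Chars.strip line = []
      · rw [if_neg (by simp [hl]), pvFres_nil_of_all_ws (pvAll_ws_of_strip_nil hl)]; rfl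
      · rw [if_pos (by simp [hl]), pvSplitOn_eq_toks]
        show ((pvFres (· == ',') (PySem.Chars.strip line)).map _) = _
        rw [pvFres_strip]
    simp only [hG]
    rw [← List.map_flatMap]
    have hfl : (PySem.Chars.splitOn (PySem.Chars.strip s.toList) ['\n']).flatMap (pvFres (· == ','))
        = pvFres pvDB (PySem.Chars.strip s.toList) := by
      rw [pvSplitOn_eq_toks]
      show (pvToks (· == '\n') (PySem.Chars.strip s.toList)).flatMap
          (fun l => ((pvToks (· == ',') l).map PySem.Chars.strip).filter (· ≠ [])) = _
      rw [pvFlatMap_filter_map, ← pvToks_flatMap]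
      rfl
    rw [hfl, pvFres_strip, List.nil_append]

theorem pvBfold (cs : List Char) : ∀ (out : List String) (cur : List Char),
    ((cs ++ [',']).foldl pvBStep (out, cur)).1
      = out ++ ((((pvToks pvDB cs).modifyHead (cur ++ ·)).map PySem.Chars.strip).filter (· ≠ [])).map
          (fun t => String.ofList t) := by
  induction cs with
  | nil =>
    intro out cur
    show (pvBStep (out, cur) ',').1 = _
    rw [show pvBStep (out, cur) ','
        = (if PySem.Chars.strip cur ≠ [] then out ++ [String.ofList (PySem.Chars.strip cur)] else out, [])
      from by simp [pvBStep]]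
    split_ifs with h
    · simp [pvToks, h]
    · simp at h; simp [pvToks, h]
  | cons c cs ih =>
    intro out cur
    obtain ⟨t, ts, ht⟩ := pvToks_cons_ex pvDB cs
    by_cases hc : c = ',' ∨ c = '\n'
    · have hdb : pvDB c = true := by rcases hc with hc | hc <;> simp [pvDB, hc]
      simp only [List.cons_append, List.foldl_cons]
      rw [show pvBStep (out, cur) c
          = (if PySem.Chars.strip cur ≠ [] then out ++ [String.ofList (PySem.Chars.strip cur)] else out, [])
        from by simp [pvBStep, hc]]
      rw [ih]
      simp only [pvToks, hdb, if_true, ht, List.modifyHead, List.map_cons, List.filter_cons,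
        List.append_nil]
      split_ifs with h1 <;> simp_all
    · have hdb : pvDB c = false := by
        push Not at hc; simp [pvDB, hc.1, hc.2]
      simp only [List.cons_append, List.foldl_cons]
      rw [show pvBStep (out, cur) c = (out, cur ++ [c]) from by simp [pvBStep, hc]]
      rw [ih]
      simp [pvToks, hdb, ht, List.modifyHead]

theorem pvB_eq_normal (s : String) :
    parse_filenames_alt s = (pvFres pvDB s.toList).map (fun t => String.ofList t) := by
  unfold parse_filenames_alt
  rw [pvBfold]
  obtain ⟨t, ts, ht⟩ := pvToks_cons_ex pvDB s.toList
  simp [ht, pvFres]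

-- ===== VERDICT (by name: the statement is the Claim_ definition above) =====
theorem parse_filenames_spec : Claim_equal_parse_filenames := by
  intro s _
  unfold Spec_parse_filenames
  rw [pvA_eq_normal, pvB_eq_normal]
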